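-- pv_equiv track=rewrite | github.com/ParshvaDongare/Road-Pothole-analysis-by-parshva | pothole_detection_pipeline.py | summarize_road_condition
-- ===== SOURCE A (Python) =====
-- def summarize_road_condition(pothole_data):
--     if not pothole_data:
--         return "Good"
--     severities = [p.get("severity", "Low") for p in pothole_data]
--     if "High" in severities:
--         return "Poor"
--     if severities.count("Medium") > len(severities) / 2:
--         return "Moderate"
--     return "Good"
-- ===== SOURCE B (Python) =====
-- def summarize_road_condition(pothole_data):
--     rank = {"High": 2, "Medium": 1}
--     rs = sorted((rank.get(p.get("severity", "Low"), 0) for p in pothole_data), reverse=True)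
--     if not rs:
--         return "Good"
--     if rs[0] == 2:
--         return "Poor"
--     return "Moderate" if rs[len(rs) // 2] == 1 else "Good"
-- ===== Notes on version B (the rewrite author's own statement) =====
-- stated objective: alternative
-- what changed: B ranks each severity numerically, sorts the ranks in descending order once, and reads the verdict from two positions of the sorted list (the head decides 'Poor' as the maximum, the element at index n//2 decides the Medium-majority test), replacing A's build-a-list-then-rescan membership test and count.
import Mathlib
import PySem

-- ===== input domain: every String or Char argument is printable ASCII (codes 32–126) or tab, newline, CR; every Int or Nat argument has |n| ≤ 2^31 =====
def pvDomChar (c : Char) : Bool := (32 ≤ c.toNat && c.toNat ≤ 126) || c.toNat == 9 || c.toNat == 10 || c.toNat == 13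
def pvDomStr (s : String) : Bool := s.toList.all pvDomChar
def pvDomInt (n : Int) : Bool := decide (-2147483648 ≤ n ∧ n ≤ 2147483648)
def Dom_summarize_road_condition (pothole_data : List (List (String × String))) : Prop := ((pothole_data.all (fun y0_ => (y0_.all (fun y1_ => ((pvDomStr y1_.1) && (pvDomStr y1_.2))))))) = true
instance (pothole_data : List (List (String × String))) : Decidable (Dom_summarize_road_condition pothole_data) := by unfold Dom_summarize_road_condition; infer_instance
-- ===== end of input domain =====

-- B replaces A's build-list-then-rescan (membership + count) strategy by sorting the
-- numerically ranked severities descending and reading the verdict off two positions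
-- (head = max, index n//2 = majority test); alternative algorithm, no speed claim.


-- ===== PORT A =====
-- 'count > len/2' is Python float comparison of two integer magnitudes; ported
-- exactly as '2*count > len' (equivalent for integers of this size).
def summarize_road_condition (pothole_data : List (List (String × String))) : String :=
  if pothole_data = [] then "Good"
  else
    let severities := pothole_data.map (fun p => (PySem.Dict.mk p).getD "severity" "Low")
    if severities.contains "High" then "Poor"
    else if 2 * (PySem.List.count severities "Medium" : Int) > (severities.length : Int) then "Moderate"
    else "Good"

-- ===== PORT B =====
-- rs[0] and rs[len//2] are always in range here (rs nonempty), so the Python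
-- indexings cannot raise; they are ported as pyGet? compared to 'some _'.
def summarize_road_condition_alt (pothole_data : List (List (String × String))) : String :=
  let rank := PySem.Dict.mk [("High", (2 : Int)), ("Medium", 1)]
  let rs := PySem.List.sorted
    (pothole_data.map (fun p => rank.getD ((PySem.Dict.mk p).getD "severity" "Low") 0))
    (fun x => x) true
  if rs = [] then "Good"
  else if PySem.List.pyGet? rs 0 = some 2 then "Poor"
  else if PySem.List.pyGet? rs (PySem.Int.floordiv (rs.length : Int) 2) = some 1 then "Moderate"
  else "Good"

-- ===== PRECONDITION & SPEC =====
def Spec_summarize_road_condition (pothole_data : List (List (String × String))) (out : String) : Prop := out = summarize_road_condition_alt pothole_data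
instance (pothole_data : List (List (String × String))) (out : String) : Decidable (Spec_summarize_road_condition pothole_data out) := by unfold Spec_summarize_road_condition; infer_instance

-- ===== CLAIM (what is proved, stated in full; the proofs are below) =====
def Claim_equal_summarize_road_condition : Prop := ∀ (pothole_data : List (List (String × String))), Dom_summarize_road_condition pothole_data → Spec_summarize_road_condition pothole_data (summarize_road_condition pothole_data)

-- ===== LEMMAS AND PROOFS =====

-- B's rank of a severity string, written out.
theorem rank_eq (s : String) :
    (PySem.Dict.mk [("High", (2 : Int)), ("Medium", 1)]).getD s 0
      = if s = "High" then 2 else if s = "Medium" then 1 else 0 := by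
  simp only [PySem.Dict.getD, PySem.Dict.get?_mk_cons]
  by_cases h1 : s = "High"
  · subst h1; simp
  · by_cases h2 : s = "Medium"
    · subst h2; simp
    · simp only [beq_iff_eq]
      rw [if_neg (fun h => h1 h.symm), if_neg (fun h => h2 h.symm), if_neg h1, if_neg h2]
      simp [PySem.Dict.get?]

-- Ranks only take the values 0, 1, 2.
theorem rank_mem (s : String) :
    (PySem.Dict.mk [("High", (2 : Int)), ("Medium", 1)]).getD s 0 = 0 ∨
    (PySem.Dict.mk [("High", (2 : Int)), ("Medium", 1)]).getD s 0 = 1 ∨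
    (PySem.Dict.mk [("High", (2 : Int)), ("Medium", 1)]).getD s 0 = 2 := by
  rw [rank_eq]; split_ifs <;> simp

-- The rank map, rewritten to its if-form pointwise.
theorem map_rank (sev : List String) :
    sev.map (fun s => (PySem.Dict.mk [("High", (2 : Int)), ("Medium", 1)]).getD s 0)
      = sev.map (fun s => if s = "High" then 2 else if s = "Medium" then 1 else 0) :=
  List.map_congr_left (fun a _ => rank_eq a)

-- Counting a rank value = counting the severity string that maps to it.
theorem count_rank_two (sev : List String) :
    (sev.map (fun s => (PySem.Dict.mk [("High", (2 : Int)), ("Medium", 1)]).getD s 0)).count 2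
      = sev.count "High" := by
  rw [map_rank]
  induction sev with
  | nil => rfl
  | cons x xs ih =>
    by_cases h1 : x = "High"
    · subst h1; simp [ih]
    · by_cases h2 : x = "Medium"
      · subst h2; simp [ih]
      · simp [ih, h1, h2]

theorem count_rank_one (sev : List String) :
    (sev.map (fun s => (PySem.Dict.mk [("High", (2 : Int)), ("Medium", 1)]).getD s 0)).count 1
      = sev.count "Medium" := by
  rw [map_rank]
  induction sev with
  | nil => rfl
  | cons x xs ih =>
    by_cases h1 : x = "High"
    · subst h1; simp [ih]
    · by_cases h2 : x = "Medium"
      · subst h2; simp [ih]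
      · simp [ih, h1, h2]

-- A {0,1,2}-valued list has as many elements as its three value counts combined.
theorem count_sum_012 (xs : List Int) (h : ∀ x ∈ xs, x = 0 ∨ x = 1 ∨ x = 2) :
    xs.count 2 + xs.count 1 + xs.count 0 = xs.length := by
  induction xs with
  | nil => rfl
  | cons x xs ih =>
    have hx := h x (by simp)
    have ih' := ih (fun y hy => h y (by simp [hy]))
    simp only [List.count_cons, List.length_cons]
    rcases hx with h' | h' | h' <;> subst h' <;> simp <;> omega

-- A descending sort of a {0,1,2}-valued list is the canonical block list.
theorem sorted_desc_blocks (xs : List Int) (h : ∀ x ∈ xs, x = 0 ∨ x = 1 ∨ x = 2) :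
    PySem.List.sorted xs (fun x => x) true
      = List.replicate (xs.count 2) 2 ++ List.replicate (xs.count 1) 1 ++ List.replicate (xs.count 0) 0 := by
  apply List.Perm.eq_of_pairwise (le := fun a b : Int => b ≤ a)
  · exact fun a b _ _ h1 h2 => le_antisymm h2 h1
  · exact PySem.List.sorted_pairwise_rev xs (fun x => x)
  · simp only [List.pairwise_append, List.pairwise_replicate, List.mem_replicate,
      List.mem_append]
    refine ⟨⟨by omega, by omega, ?_⟩, by omega, ?_⟩ <;> intro a ha b hb <;> omega
  · refine (PySem.List.sorted_perm xs (fun x => x) true).trans (List.perm_iff_count.mpr ?_)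
    intro a
    simp only [List.count_append, List.count_replicate]
    by_cases h2 : a = 2
    · subst h2; simp
    · by_cases h1 : a = 1
      · subst h1; simp
      · by_cases h0 : a = 0
        · subst h0; simp
        · have : xs.count a = 0 := by
            refine List.count_eq_zero.mpr (fun hmem => ?_)
            rcases h a hmem with h' | h' | h' <;> simp_all
          simp_all

-- Indexing the block list.
theorem blocks_getElem? (c1 c0 i : Nat) (hi : i < c1 + c0) :
    (List.replicate c1 (1 : Int) ++ List.replicate c0 0)[i]? = some (if i < c1 then 1 else 0) := by
  by_cases h : i < c1
  · rw [List.getElem?_append_left (by simpa using h)]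
    simp [h]
  · rw [List.getElem?_append_right (by simpa using h)]
    simp only [List.length_replicate, List.getElem?_replicate]
    have : i - c1 < c0 := by omega
    simp [this, h]

theorem summarize_eq (pd : List (List (String × String))) :
    summarize_road_condition pd = summarize_road_condition_alt pd := by
  unfold summarize_road_condition summarize_road_condition_alt
  simp only [PySem.List.count_eq]
  set sev := pd.map (fun p => (PySem.Dict.mk p).getD "severity" "Low") with hsev
  have hmapmap :
      pd.map (fun p =>
          (PySem.Dict.mk [("High", (2 : Int)), ("Medium", 1)]).getD
            ((PySem.Dict.mk p).getD "severity" "Low") 0)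
        = sev.map (fun s => (PySem.Dict.mk [("High", (2 : Int)), ("Medium", 1)]).getD s 0) := by
    simp [hsev, List.map_map, Function.comp]
  rw [hmapmap]
  set rks := sev.map (fun s => (PySem.Dict.mk [("High", (2 : Int)), ("Medium", 1)]).getD s 0)
    with hrks
  have hblocks := sorted_desc_blocks rks (by
    intro x hx
    rcases List.mem_map.mp hx with ⟨s, _, rfl⟩
    exact rank_mem s)
  rw [hblocks, hrks, count_rank_two, count_rank_one]
  cases pd with
  | nil => simp [hsev]
  | cons p ps =>
    have hne : p :: ps ≠ ([] : List (List (String × String))) := by simp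
    simp only [if_neg hne]
    set c2 := sev.count "High" with hc2
    set c1 := sev.count "Medium" with hc1
    set c0 := rks.count 0 with hc0
    have hsum : c2 + c1 + c0 = sev.length := by
      have h012 : ∀ x ∈ rks, x = 0 ∨ x = 1 ∨ x = 2 := by
        intro x hx
        rcases List.mem_map.mp hx with ⟨s, _, rfl⟩
        exact rank_mem s
      have hcs := count_sum_012 rks h012
      rw [hrks, count_rank_two, count_rank_one, List.length_map] at hcs
      omega
    by_cases hH : sev.contains "High"
    · -- "High" present: A returns Poor; B sees head 2.
      have hc2pos : 0 < c2 := by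
        rw [hc2]
        exact List.count_pos_iff.mpr (by simpa [List.contains_iff_mem] using hH)
      obtain ⟨k, hk⟩ : ∃ k, c2 = k + 1 := ⟨c2 - 1, by omega⟩
      rw [if_pos hH, hk]
      simp [List.replicate_succ]
    · -- no "High": c2 = 0; B inspects position n/2 of the 1-then-0 block list.
      have hc2z : c2 = 0 := by
        rw [hc2]
        refine List.count_eq_zero.mpr (fun hmem => hH ?_)
        simpa using hmem
      rw [if_neg (by simpa using hH), hc2z]
      simp only [List.replicate_zero, List.nil_append]
      have hlenblocks : (List.replicate c1 (1 : Int) ++ List.replicate c0 0).length = c1 + c0 := by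
        simp
      have hnpos : 0 < c1 + c0 := by
        have : 0 < sev.length := by simp [hsev]
        omega
      have hne' : (List.replicate c1 (1 : Int) ++ List.replicate c0 0) ≠ [] := by
        intro hnil
        have := congrArg List.length hnil
        simp at this
        omega
      rw [if_neg hne']
      have hget0 : PySem.List.pyGet? (List.replicate c1 (1 : Int) ++ List.replicate c0 0) 0
          = some (if 0 < c1 then 1 else 0) := by
        rw [show (0 : Int) = ((0 : Nat) : Int) from rfl, PySem.List.pyGet?_natCast]
        exact blocks_getElem? c1 c0 0 hnpos
      have hhead_ne : ¬ (PySem.List.pyGet? (List.replicate c1 (1 : Int) ++ List.replicate c0 0) 0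
          = some 2) := by
        rw [hget0]; split_ifs <;> simp
      rw [if_neg hhead_ne]
      -- the midpoint index
      have hdiv : PySem.Int.floordiv (((List.replicate c1 (1 : Int) ++ List.replicate c0 0).length : Int)) 2
          = (((c1 + c0) / 2 : Nat) : Int) := by
        rw [hlenblocks]
        exact_mod_cast PySem.Int.floordiv_natCast (c1 + c0) 2
      have hmidlt : (c1 + c0) / 2 < c1 + c0 := Nat.div_lt_self hnpos (by omega)
      have hgetmid : PySem.List.pyGet? (List.replicate c1 (1 : Int) ++ List.replicate c0 0)
            (PySem.Int.floordiv (((List.replicate c1 (1 : Int) ++ List.replicate c0 0).length : Int)) 2)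
          = some (if (c1 + c0) / 2 < c1 then 1 else 0) := by
        rw [hdiv, PySem.List.pyGet?_natCast]
        exact blocks_getElem? c1 c0 _ hmidlt
      by_cases hM : 2 * (c1 : Int) > (sev.length : Int)
      · have hmid : (c1 + c0) / 2 < c1 := by omega
        rw [if_pos hM, if_pos (by rw [hgetmid]; simp [hmid])]
      · have hmid : ¬ (c1 + c0) / 2 < c1 := by omega
        rw [if_neg hM, if_neg (by rw [hgetmid]; simp [hmid])]

-- ===== VERDICT (by name: the statement is the Claim_ definition above) =====
theorem summarize_road_condition_spec : Claim_equal_summarize_road_condition := by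
  intro pd _
  exact summarize_eq pd
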